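-- pv_equiv track=rewrite | github.com/aizhansapina/BFDjango | week1/codingbat/WarmUp2/W2str_match.py | string_match
-- ===== SOURCE A (Python) =====
-- def string_match(a, b):
--   cnt = 0
--   short = 0
--   n = len(a)
--   m = len(b)
--
--   if n < m:
--     short = n
--   if m < n:
--     short = m
--   if n == m:
--     short = n
--
--   for i in range(short - 1):
--     for j in range(short - 1):
--       if a[i] == b[j] and a[i + 1] == b[j + 1]:
--         cnt += 1
--   return cnt
-- ===== SOURCE B (Python) =====
-- def string_match(a, b):
--     short = min(len(a), len(b))
--     counts = {}
--     for j in range(short - 1):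
--         g = (b[j], b[j + 1])
--         counts[g] = counts.get(g, 0) + 1
--     return sum(counts.get((a[i], a[i + 1]), 0) for i in range(short - 1))
-- ===== Notes on version B (the rewrite author's own statement) =====
-- stated objective: faster
-- what changed: Replaced the quadratic double loop comparing every 2-gram of a against every 2-gram of b with a single pass that counts b's 2-grams in a dictionary and then sums the lookups for a's 2-grams.
import Mathlib
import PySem

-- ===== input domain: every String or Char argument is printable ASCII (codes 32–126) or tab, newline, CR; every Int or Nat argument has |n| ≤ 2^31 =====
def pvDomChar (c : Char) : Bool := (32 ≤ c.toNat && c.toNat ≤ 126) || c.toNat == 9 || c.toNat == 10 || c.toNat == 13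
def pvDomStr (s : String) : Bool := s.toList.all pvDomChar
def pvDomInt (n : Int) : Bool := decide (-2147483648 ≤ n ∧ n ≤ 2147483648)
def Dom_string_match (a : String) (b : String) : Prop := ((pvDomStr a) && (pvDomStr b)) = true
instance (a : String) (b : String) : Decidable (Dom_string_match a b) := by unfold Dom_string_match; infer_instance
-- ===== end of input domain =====

-- B replaces A's quadratic all-pairs 2-gram comparison by one dictionary pass over b's
-- 2-grams followed by a sum of lookups for a's 2-grams (objective: faster, asymptotic).

-- ===== PORT A =====
def string_match (a : String) (b : String) : Int :=
  let la := a.toList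
  let lb := b.toList
  let n : Int := la.length
  let m : Int := lb.length
  let short : Int := 0
  let short : Int := if n < m then n else short
  let short : Int := if m < n then m else short
  let short : Int := if n == m then n else short
  (PySem.List.pyRange 0 (short - 1) 1).foldl (fun cnt i =>
    (PySem.List.pyRange 0 (short - 1) 1).foldl (fun cnt j =>
      if PySem.List.pyGet? la i == PySem.List.pyGet? lb j
          && PySem.List.pyGet? la (i + 1) == PySem.List.pyGet? lb (j + 1)
      then cnt + 1 else cnt) cnt) 0

-- ===== PORT B =====
def string_match_alt (a : String) (b : String) : Int :=
  let la := a.toList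
  let lb := b.toList
  let short : Int := min (la.length : Int) (lb.length : Int)
  let counts : PySem.Dict (Option Char × Option Char) Int :=
    (PySem.List.pyRange 0 (short - 1) 1).foldl (fun d j =>
      let g := (PySem.List.pyGet? lb j, PySem.List.pyGet? lb (j + 1))
      d.insert g (d.getD g 0 + 1)) PySem.Dict.empty
  ((PySem.List.pyRange 0 (short - 1) 1).map (fun i =>
    counts.getD (PySem.List.pyGet? la i, PySem.List.pyGet? la (i + 1)) 0)).sum

-- ===== PRECONDITION & SPEC =====
def Spec_string_match (a : String) (b : String) (out : Int) : Prop := out = string_match_alt a b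
instance (a : String) (b : String) (out : Int) : Decidable (Spec_string_match a b out) := by unfold Spec_string_match; infer_instance

-- ===== CLAIM (what is proved, stated in full; the proofs are below) =====
def Claim_equal_string_match : Prop := ∀ (a : String) (b : String), Dom_string_match a b → Spec_string_match a b (string_match a b)

-- ===== LEMMAS AND PROOFS =====

-- A's cascade of three ifs computes min.
lemma pv_cascade_min (n m : Int) :
    (if n == m then n else if m < n then m else if n < m then n else 0) = min n m := by
  have h : (n == m) = decide (n = m) := rfl
  rw [h]
  split_ifs with h1 h2 h3 <;> simp_all <;> omega

-- the two 2-gram match tests agree (pair beq vs the conjunction in A)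
lemma pv_beq_pair (x y u v : Option Char) :
    (((u, v) : Option Char × Option Char) == (x, y)) = (x == u && y == v) := by
  rw [Bool.eq_iff_iff]
  simp only [Prod.mk.injEq, beq_iff_eq, Bool.and_eq_true]
  constructor <;> rintro ⟨h1, h2⟩ <;> exact ⟨h1.symm, h2.symm⟩

lemma pv_main (a b : String) : string_match a b = string_match_alt a b := by
  unfold string_match string_match_alt
  simp only []
  rw [pv_cascade_min]
  set la := a.toList
  set lb := b.toList
  set s : Int := min (la.length : Int) (lb.length : Int) - 1 with hs
  set gB : Int → Option Char × Option Char :=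
    fun j => (PySem.List.pyGet? lb j, PySem.List.pyGet? lb (j + 1)) with hgB
  set R := PySem.List.pyRange 0 s 1 with hR
  -- A side: inner loop is a countP, outer loop a sum
  simp only [PySem.List.foldl_count_if, PySem.List.foldl_add, zero_add]
  -- B side: the dictionary loop is a fold over the mapped gram list
  rw [← List.foldl_map (f := gB)
      (g := fun (d : PySem.Dict (Option Char × Option Char) Int) x =>
        d.insert x (d.getD x 0 + 1))]
  simp only [PySem.Dict.getD_foldl_insert_add_one, PySem.Dict.getD_empty, zero_add,
    List.count_eq_countP, List.countP_map]
  congr 1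
  apply List.map_congr_left
  intro i _
  congr 1
  apply List.countP_congr
  intro j _
  simp only [Function.comp_apply, hgB, pv_beq_pair]

-- ===== VERDICT (by name: the statement is the Claim_ definition above) =====
theorem string_match_spec : Claim_equal_string_match := by
  intro a b _
  unfold Spec_string_match
  exact pv_main a b
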